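-- pv_equiv track=rewrite | github.com/JoaoAntonio37UEPB/IP---2022.1 | Lista 4 - Funções e Escopo de Variável/Exercício 5.py | servir
-- ===== SOURCE A (Python) =====
-- def servir(a):
--
--     nova_gorjeta = 0
--
--     if a % 10 == 0:
--         nova_gorjeta += 5
--     else:
--         while a % 10 != 0:
--             a += 1
--             nova_gorjeta += 1
--
--     return nova_gorjeta
-- ===== SOURCE B (Python) =====
-- def servir(a):
--     # closed form: distance to the next multiple of 10, with 5 on exact multiples
--     r = a % 10
--     return 5 if r == 0 else 10 - r
-- ===== Notes on version B (the rewrite author's own statement) =====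
-- stated objective: simpler
-- what changed: Replaced the unit-step while loop that counts increments with closed-form modular arithmetic giving the distance to the next multiple of ten.
import Mathlib
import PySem

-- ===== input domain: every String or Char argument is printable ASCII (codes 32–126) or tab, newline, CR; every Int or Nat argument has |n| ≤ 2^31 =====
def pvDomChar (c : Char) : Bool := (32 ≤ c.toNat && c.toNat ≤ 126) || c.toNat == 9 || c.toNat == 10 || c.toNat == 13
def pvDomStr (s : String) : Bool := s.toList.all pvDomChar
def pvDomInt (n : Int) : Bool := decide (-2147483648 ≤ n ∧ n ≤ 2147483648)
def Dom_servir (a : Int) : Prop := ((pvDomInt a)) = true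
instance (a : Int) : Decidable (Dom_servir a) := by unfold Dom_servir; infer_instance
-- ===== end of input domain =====

-- B replaces A's unit-step while loop with the closed-form 10 - a % 10 (5 on multiples of 10); simpler.


-- ===== PORT A =====
-- while a % 10 != 0: a += 1; nova_gorjeta += 1
-- (fuel 10 only makes the recursion structural; the loop runs at most 9 steps, proved below)
def servirLoop : Nat → Int → Int → Int
  | 0, _, g => g
  | n + 1, a, g => if PySem.Int.mod a 10 ≠ 0 then servirLoop n (a + 1) (g + 1) else g

def servir (a : Int) : Int :=
  if PySem.Int.mod a 10 = 0 then 0 + 5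
  else servirLoop 10 a 0

-- ===== PORT B =====
def servir_alt (a : Int) : Int :=
  let r := PySem.Int.mod a 10
  if r = 0 then 5 else 10 - r

-- ===== PRECONDITION & SPEC =====
def Spec_servir (a : Int) (out : Int) : Prop := out = servir_alt a
instance (a : Int) (out : Int) : Decidable (Spec_servir a out) := by unfold Spec_servir; infer_instance

-- ===== CLAIM (what is proved, stated in full; the proofs are below) =====
def Claim_equal_servir : Prop := ∀ (a : Int), Dom_servir a → Spec_servir a (servir a)

-- ===== LEMMAS AND PROOFS =====
-- Python's % for the positive divisor 10 coincides with Lean's % on Int (cited by the proofs)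
theorem pymod10 (a : Int) : PySem.Int.mod a 10 = a % 10 := by
  simp [PySem.Int.mod, Int.fmod_eq_emod]

theorem servirLoop_eq (n : Nat) (a g : Int) (h : PySem.Int.mod a 10 ≠ 0)
    (hn : (10 - a % 10).toNat ≤ n) :
    servirLoop n a g = g + (10 - PySem.Int.mod a 10) := by
  induction n generalizing a g with
  | zero => rw [pymod10] at h; omega
  | succ n ih =>
    rw [servirLoop, if_pos h]
    by_cases h2 : PySem.Int.mod (a + 1) 10 ≠ 0
    · rw [ih (a + 1) (g + 1) h2 (by rw [pymod10] at h h2; omega)]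
      simp only [pymod10] at *
      omega
    · push_neg at h2
      cases n with
      | zero =>
        simp only [servirLoop, pymod10] at *
        omega
      | succ m =>
        rw [servirLoop, if_neg (by simpa using h2)]
        simp only [pymod10] at *
        omega

-- ===== VERDICT (by name: the statement is the Claim_ definition above) =====
theorem servir_spec : Claim_equal_servir := by
  intro a _
  unfold Spec_servir servir servir_alt
  by_cases h : PySem.Int.mod a 10 = 0
  · rw [if_pos h, if_pos h]
    norm_num
  · rw [if_neg h, servirLoop_eq 10 a 0 h (by rw [pymod10] at h; omega), if_neg h]
    ring
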